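-- pv_equiv track=rewrite | github.com/nickmeinhold/flux-shadow | src/immunity.py | _find_top_level_additions
-- ===== SOURCE A (Python) =====
-- SENSITIVE_PATHS = [
--     "CLAUDE.md",
--     "src/",
--     "state/",
--     "dreams/",
--     "memories/",
--     ".github/workflows/",
--     "README.md",
-- ]
--
-- KNOWN_SUBDIRS = ["books/", "greetings/", "docs/", "contrib/"]
--
-- def _find_top_level_additions(files: list[str]) -> list[str]:
--     """Find files outside recognized subdirectories."""
--     outside = []
--     for filepath in files:
--         if "/" not in filepath:
--             outside.append(filepath)
--         else:
--             in_known = any(filepath.startswith(sub) for sub in KNOWN_SUBDIRS)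
--             in_sensitive = any(
--                 filepath.startswith(s) for s in SENSITIVE_PATHS if s.endswith("/")
--             )
--             if not in_known and not in_sensitive:
--                 outside.append(filepath)
--     return outside
-- ===== SOURCE B (Python) =====
-- KNOWN_TOP = frozenset(
--     {"books", "greetings", "docs", "contrib", "src", "state", "dreams", "memories"}
-- )
--
--
-- def _outside(filepath: str) -> bool:
--     head, sep, _ = filepath.partition("/")
--     return not sep or (
--         head not in KNOWN_TOP and not filepath.startswith(".github/workflows/")
--     )
--
--
-- def _find_top_level_additions(files: list[str]) -> list[str]:
--     """Find files outside recognized subdirectories."""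
--     return [f for f in files if _outside(f)]
-- ===== Notes on version B (the rewrite author's own statement) =====
-- stated objective: alternative
-- what changed: Instead of scanning two prefix lists with startswith per file, B splits each path at its first '/' and decides by one hash-set membership test on the top-level segment (plus the single two-level prefix '.github/workflows/'), dropping the redundant no-slash branch.
import Mathlib
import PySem

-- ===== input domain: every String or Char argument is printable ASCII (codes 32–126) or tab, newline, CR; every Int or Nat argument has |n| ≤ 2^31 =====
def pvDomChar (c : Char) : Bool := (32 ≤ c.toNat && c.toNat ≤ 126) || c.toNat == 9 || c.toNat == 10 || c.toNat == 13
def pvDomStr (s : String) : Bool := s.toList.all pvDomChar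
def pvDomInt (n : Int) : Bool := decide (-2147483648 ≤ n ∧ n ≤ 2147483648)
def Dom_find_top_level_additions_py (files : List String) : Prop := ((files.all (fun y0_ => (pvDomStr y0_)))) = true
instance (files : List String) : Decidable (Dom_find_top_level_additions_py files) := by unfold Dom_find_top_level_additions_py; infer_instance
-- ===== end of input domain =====

-- B replaces A's per-file scans over two prefix lists by a single membership test of the
-- path's first segment in a set of known top-level directory names (alternative decomposition).

-- ===== PORT A =====
def pvSensitivePaths : List String :=
  ["CLAUDE.md", "src/", "state/", "dreams/", "memories/", ".github/workflows/", "README.md"]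

def pvKnownSubdirs : List String := ["books/", "greetings/", "docs/", "contrib/"]

def find_top_level_additions_py (files : List String) : List String :=
  files.foldl (fun outside filepath =>
    if PySem.Str.isIn "/" filepath = false then outside ++ [filepath]
    else
      let in_known := pvKnownSubdirs.any (fun sub => PySem.Str.startswith filepath sub)
      let in_sensitive := (pvSensitivePaths.filter
          (fun s => PySem.Str.endswith s "/")).any (fun s => PySem.Str.startswith filepath s)
      if (!in_known && !in_sensitive) = true then outside ++ [filepath] else outside) []

-- ===== PORT B =====
def pvKnownTop : List String :=
  ["books", "greetings", "docs", "contrib", "src", "state", "dreams", "memories"]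

-- filepath.partition("/"): head = chars before the first '/', sep nonempty iff '/' occurs
def pvOutside (filepath : String) : Bool :=
  let cs := filepath.toList
  let head := cs.takeWhile (fun c => c ≠ '/')
  let sep := cs.contains '/'
  !sep || (!(pvKnownTop.map String.toList).contains head
           && !PySem.Chars.startswith cs ".github/workflows/".toList)

def find_top_level_additions_py_alt (files : List String) : List String :=
  files.filter pvOutside

-- ===== PRECONDITION & SPEC =====
def Spec_find_top_level_additions_py (files : List String) (out : List String) : Prop := out = find_top_level_additions_py_alt files
instance (files : List String) (out : List String) : Decidable (Spec_find_top_level_additions_py files out) := by unfold Spec_find_top_level_additions_py; infer_instance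

-- ===== CLAIM (what is proved, stated in full; the proofs are below) =====
def Claim_equal_find_top_level_additions_py : Prop := ∀ (files : List String), Dom_find_top_level_additions_py files → Spec_find_top_level_additions_py files (find_top_level_additions_py files)

-- ===== LEMMAS AND PROOFS =====

-- A's per-file condition, factored out of the fold body
def pvACond (f : String) : Bool :=
  if PySem.Str.isIn "/" f = false then true
  else
    (!pvKnownSubdirs.any (fun sub => PySem.Str.startswith f sub) &&
     !(pvSensitivePaths.filter (fun s => PySem.Str.endswith s "/")).any
         (fun s => PySem.Str.startswith f s))

-- a prefix "name/" whose only '/' is at the end matches iff the first segment equals name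
theorem prefix_slash_iff (n : List Char) (hn : '/' ∉ n) :
    ∀ cs : List Char, (n ++ ['/']) <+: cs ↔ (cs.takeWhile (fun c => c ≠ '/') = n ∧ '/' ∈ cs) := by
  induction n with
  | nil =>
    intro cs
    cases cs with
    | nil => simp
    | cons c cs' =>
      by_cases hc : c = '/'
      · subst hc; simp [List.takeWhile]
      · simp [List.takeWhile, hc, List.cons_prefix_cons, Ne.symm hc]
  | cons a n' ih =>
    have ha : a ≠ '/' := fun h => hn (h ▸ List.mem_cons_self)
    have hn' : '/' ∉ n' := fun h => hn (List.mem_cons_of_mem _ h)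
    intro cs
    cases cs with
    | nil => simp
    | cons c cs' =>
      by_cases hc : c = a
      · subst hc
        simp [List.cons_prefix_cons, List.takeWhile, ha, ih hn' cs', Ne.symm ha]
      · by_cases hs : c = '/'
        · subst hs
          simp [List.cons_prefix_cons, List.takeWhile, Ne.symm hc]
        · simp [List.cons_prefix_cons, List.takeWhile, hs, hc, Ne.symm hc]

theorem body_eq (f : String) : pvACond f = pvOutside f := by
  by_cases hc : '/' ∈ f.toList
  · have hin : PySem.Str.isIn "/" f = true := by
      rw [PySem.Str.isIn_eq]
      exact (PySem.Chars.isIn_iff_infix _ _).mpr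
        (by simpa using (List.singleton_infix_iff '/' f.toList).mpr hc)
    have hW : ∀ n : List Char, '/' ∉ n →
        (PySem.Chars.startswith f.toList (n ++ ['/']) = true ↔
         f.toList.takeWhile (fun c => c ≠ '/') = n) := by
      intro n hn
      rw [PySem.Chars.startswith_iff, prefix_slash_iff n hn, and_iff_left hc]
    have hB : ∀ n : List Char, '/' ∉ n →
        PySem.Chars.startswith f.toList (n ++ ['/'])
          = (f.toList.takeWhile (fun c => c ≠ '/') == n) := by
      intro n hn
      rw [Bool.eq_iff_iff, hW n hn, beq_iff_eq]
    have b1 := hB "books".toList (by decide)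
    have b2 := hB "greetings".toList (by decide)
    have b3 := hB "docs".toList (by decide)
    have b4 := hB "contrib".toList (by decide)
    have b5 := hB "src".toList (by decide)
    have b6 := hB "state".toList (by decide)
    have b7 := hB "dreams".toList (by decide)
    have b8 := hB "memories".toList (by decide)
    have hfil : pvSensitivePaths.filter (fun s => PySem.Str.endswith s "/")
        = ["src/", "state/", "dreams/", "memories/", ".github/workflows/"] := by decide
    have hcb : f.toList.contains '/' = true := List.contains_iff_mem.mpr hc
    rw [Bool.eq_iff_iff]
    simp only [pvACond, hin, hfil, pvKnownSubdirs,
      pvOutside, pvKnownTop, hcb, List.map, List.any_cons, List.any_nil,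
      List.contains_cons, List.contains_nil, PySem.Str.startswith_eq,
      show ("books/" : String).toList = "books".toList ++ ['/'] from rfl,
      show ("greetings/" : String).toList = "greetings".toList ++ ['/'] from rfl,
      show ("docs/" : String).toList = "docs".toList ++ ['/'] from rfl,
      show ("contrib/" : String).toList = "contrib".toList ++ ['/'] from rfl,
      show ("src/" : String).toList = "src".toList ++ ['/'] from rfl,
      show ("state/" : String).toList = "state".toList ++ ['/'] from rfl,
      show ("dreams/" : String).toList = "dreams".toList ++ ['/'] from rfl,
      show ("memories/" : String).toList = "memories".toList ++ ['/'] from rfl,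
      b1, b2, b3, b4, b5, b6, b7, b8]
    simp only [Bool.true_eq_false, if_false, Bool.not_true, Bool.false_or, Bool.and_eq_true, Bool.not_eq_true',
      Bool.or_eq_false_iff]
    tauto
  · have hin : PySem.Str.isIn "/" f = false := by
      rw [PySem.Str.isIn_eq]
      exact (PySem.Chars.isIn_eq_false_iff _ _).mpr
        (by simpa using fun h => hc ((List.singleton_infix_iff '/' f.toList).mp (by simpa using h)))
    have hcb : f.toList.contains '/' = false := by
      simpa [List.contains_iff_mem] using hc
    unfold pvACond pvOutside
    rw [if_pos hin]
    simp only [hcb, Bool.not_false, Bool.true_or]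

theorem A_eq_filter (files : List String) :
    find_top_level_additions_py files = files.filter pvACond := by
  unfold find_top_level_additions_py
  have hfun : (fun (outside : List String) (filepath : String) =>
      if PySem.Str.isIn "/" filepath = false then outside ++ [filepath]
      else
        let in_known := pvKnownSubdirs.any (fun sub => PySem.Str.startswith filepath sub)
        let in_sensitive := (pvSensitivePaths.filter
            (fun s => PySem.Str.endswith s "/")).any (fun s => PySem.Str.startswith filepath s)
        if (!in_known && !in_sensitive) = true then outside ++ [filepath] else outside)
      = (fun outside filepath => if pvACond filepath = true then outside ++ [filepath] else outside) := by
    funext outside filepath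
    by_cases h1 : PySem.Str.isIn "/" filepath = false
    · have hA : pvACond filepath = true := by unfold pvACond; rw [if_pos h1]
      rw [if_pos h1, hA]; simp
    · have hA : pvACond filepath
          = (!pvKnownSubdirs.any (fun sub => PySem.Str.startswith filepath sub) &&
             !(pvSensitivePaths.filter (fun s => PySem.Str.endswith s "/")).any
                 (fun s => PySem.Str.startswith filepath s)) := by
        unfold pvACond; rw [if_neg h1]
      rw [if_neg h1, hA]
  rw [hfun]
  simpa using PySem.List.foldl_append_if_eq_filter pvACond files []

-- ===== VERDICT (by name: the statement is the Claim_ definition above) =====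
theorem find_top_level_additions_py_spec : Claim_equal_find_top_level_additions_py := by
  intro files _
  unfold Spec_find_top_level_additions_py find_top_level_additions_py_alt
  rw [A_eq_filter files]
  exact List.filter_congr (fun x _ => body_eq x)
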